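-- pv_equiv track=rewrite | github.com/AshuAhlawat/Python | Practice/alternate_chars.py | count_alter
-- ===== SOURCE A (Python) =====
-- from itertools import combinations,groupby
--
-- def count_alter(combo, string):
--     new_str = ""
--     for char in string:
--         if char in combo:
--             new_str += char
--
--     grouping = groupby(new_str)
--
--
--     length = 0
--     for key, group in grouping:
--         temp = list(group)
--         length += 1
--         if len(temp)>1:
--             return 0
--
--     return length
-- ===== SOURCE B (Python) =====
-- def count_alter(combo, string):
--     prev = None
--     count = 0
--     for char in string:
--         if char in combo:
--             if char == prev:
--                 return 0
--             count += 1
--             prev = char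
--     return count
-- ===== Notes on version B (the rewrite author's own statement) =====
-- stated objective: simpler
-- what changed: Replaced A's three stages (build a filtered string by repeated concatenation, itertools.groupby it, then loop over groups materializing each one) by one scan that keeps the previous matching character and a counter, returning 0 on the first adjacent repeat.
import Mathlib
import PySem

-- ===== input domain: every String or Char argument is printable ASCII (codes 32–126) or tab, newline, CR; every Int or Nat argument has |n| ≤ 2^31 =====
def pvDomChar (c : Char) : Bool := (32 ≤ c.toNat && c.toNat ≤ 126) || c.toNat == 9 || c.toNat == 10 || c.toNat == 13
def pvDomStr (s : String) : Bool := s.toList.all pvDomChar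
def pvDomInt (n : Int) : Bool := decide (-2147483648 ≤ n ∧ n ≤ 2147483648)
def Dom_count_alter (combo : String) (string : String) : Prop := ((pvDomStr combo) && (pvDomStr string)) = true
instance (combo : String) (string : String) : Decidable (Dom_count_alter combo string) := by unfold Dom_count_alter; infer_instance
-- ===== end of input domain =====

-- B replaces A's filter string + itertools.groupby + group-length loop by a single scan
-- with a previous-matching-char option and a counter (objective: simpler; same cost).

-- ===== PORT A =====
-- new_str: the loop appending each char of string that is in combo ('char in combo' = substring test)
def caFilt (combo : List Char) : List Char → List Char
  | [] => []
  | c :: t => if PySem.Chars.isIn [c] combo then c :: caFilt combo t else caFilt combo t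

-- helper for groupby: length of the leading run of c and the remainder
def caTakeRun (c : Char) : List Char → Nat × List Char
  | [] => (0, [])
  | d :: t => if d = c then ((caTakeRun c t).1 + 1, (caTakeRun c t).2) else (0, d :: t)

theorem caTakeRun_len (c : Char) : ∀ t : List Char, (caTakeRun c t).2.length ≤ t.length := by
  intro t
  induction t with
  | nil => simp [caTakeRun]
  | cons d t ih =>
    by_cases h : d = c <;> simp [caTakeRun, h] <;> omega

-- itertools.groupby(new_str): the list of (key, group length) runs, left to right
def caRuns : List Char → List (Char × Nat)
  | [] => []
  | c :: t => (c, (caTakeRun c t).1 + 1) :: caRuns (caTakeRun c t).2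
termination_by l => l.length
decreasing_by
  have := caTakeRun_len c t
  simp
  omega

-- A's second loop: length += 1; if len(list(group)) > 1: return 0
def caLoop : List (Char × Nat) → Int → Int
  | [], len => len
  | (_, n) :: t, len => if n > 1 then (0 : Int) else caLoop t (len + 1)

def count_alter (combo : String) (string : String) : Int :=
  caLoop (caRuns (caFilt combo.toList string.toList)) 0

-- ===== PORT B =====
-- single scan: prev = last char that passed the filter (None initially), count of passes
def cbLoop (combo : List Char) : List Char → Option Char → Int → Int
  | [], _, cnt => cnt
  | c :: t, prev, cnt =>
    if PySem.Chars.isIn [c] combo then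
      if some c = prev then (0 : Int) else cbLoop combo t (some c) (cnt + 1)
    else cbLoop combo t prev cnt

def count_alter_alt (combo : String) (string : String) : Int :=
  cbLoop combo.toList string.toList none 0

-- ===== PRECONDITION & SPEC =====
def Spec_count_alter (combo : String) (string : String) (out : Int) : Prop := out = count_alter_alt combo string
instance (combo : String) (string : String) (out : Int) : Decidable (Spec_count_alter combo string out) := by unfold Spec_count_alter; infer_instance

-- ===== CLAIM (what is proved, stated in full; the proofs are below) =====
def Claim_equal_count_alter : Prop := ∀ (combo : String) (string : String), Dom_count_alter combo string → Spec_count_alter combo string (count_alter combo string)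

-- ===== LEMMAS AND PROOFS =====

-- B's scan on the raw string equals the same scan (filter removed) on A's filtered string
def gScan : List Char → Option Char → Int → Int
  | [], _, cnt => cnt
  | c :: t, prev, cnt => if some c = prev then (0 : Int) else gScan t (some c) (cnt + 1)

theorem cbLoop_eq_gScan (combo : List Char) :
    ∀ (s : List Char) (prev : Option Char) (cnt : Int),
      cbLoop combo s prev cnt = gScan (caFilt combo s) prev cnt := by
  intro s
  induction s with
  | nil => intro prev cnt; simp [cbLoop, caFilt, gScan]
  | cons c t ih =>
    intro prev cnt
    by_cases h : PySem.Chars.isIn [c] combo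
    · by_cases hp : some c = prev <;> simp [cbLoop, caFilt, h, hp, gScan, ih]
    · simp [cbLoop, caFilt, h, ih]

-- the adjacency scan equals A's run-based loop, provided prev differs from the head
theorem gScan_eq_caLoop :
    ∀ (n : ℕ) (l : List Char), l.length ≤ n →
      ∀ (prev : Option Char) (cnt : Int),
        (∀ c, l.head? = some c → prev ≠ some c) →
        gScan l prev cnt = caLoop (caRuns l) cnt := by
  intro n
  induction n with
  | zero =>
    intro l hl prev cnt _
    have : l = [] := List.length_eq_zero_iff.mp (Nat.le_zero.mp hl)
    subst this
    simp [gScan, caRuns, caLoop]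
  | succ n ih =>
    intro l hl prev cnt hprev
    cases l with
    | nil => simp [gScan, caRuns, caLoop]
    | cons c t =>
      have hne : prev ≠ some c := hprev c (by simp)
      have hstep : gScan (c :: t) prev cnt = gScan t (some c) (cnt + 1) := by
        simp [gScan]
        intro h; exact absurd h.symm hne
      rw [hstep, caRuns]
      cases t with
      | nil =>
        simp [caTakeRun, caLoop, caRuns, gScan]
      | cons d t' =>
        by_cases hd : d = c
        · subst hd
          have hrun : 1 ≤ (caTakeRun d (d :: t')).1 := by simp [caTakeRun]
          have : caLoop ((d, (caTakeRun d (d :: t')).1 + 1) :: caRuns (caTakeRun d (d :: t')).2) cnt = 0 := by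
            simp [caLoop]; omega
          rw [this]
          simp [gScan]
        · have htr : caTakeRun c (d :: t') = (0, d :: t') := by simp [caTakeRun, hd]
          rw [htr]
          have hloop : caLoop ((c, 0 + 1) :: caRuns (d :: t')) cnt = caLoop (caRuns (d :: t')) (cnt + 1) := by
            simp [caLoop]
          rw [hloop]
          apply ih (d :: t') (by simpa using Nat.lt_succ_iff.mp (by simpa using hl)) (some c) (cnt + 1)
          intro e he
          simp at he
          subst he
          intro h; exact hd (Option.some.inj h.symm)

-- ===== VERDICT (by name: the statement is the Claim_ definition above) =====
theorem count_alter_spec : Claim_equal_count_alter := by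
  intro combo string _
  unfold Spec_count_alter count_alter count_alter_alt
  rw [cbLoop_eq_gScan]
  rw [gScan_eq_caLoop (caFilt combo.toList string.toList).length _ le_rfl]
  intro c _
  simp
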